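-- pv_equiv track=rewrite | github.com/ghantakiran/ShieldOps | src/shieldops/topology/dependency_mapper.py | _find_single_points
-- ===== SOURCE A (Python) =====
-- def _find_single_points(adj: dict[str, list[str]]) -> list[str]:
--     incoming: dict[str, int] = {}
--     for targets in adj.values():
--         for t in targets:
--             incoming[t] = incoming.get(t, 0) + 1
--     singles: list[str] = []
--     for svc, count in incoming.items():
--         dependents = sum(1 for targets in adj.values() if svc in targets)
--         outgoing = len(adj.get(svc, []))
--         if (dependents >= 2 and outgoing == 0) or count >= 3:
--             singles.append(svc)
--     return sorted(set(singles))
-- ===== SOURCE B (Python) =====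
-- def _find_single_points(adj: dict[str, list[str]]) -> list[str]:
--     incoming: dict[str, int] = {}
--     dependents: dict[str, int] = {}
--     for targets in adj.values():
--         for t in targets:
--             incoming[t] = incoming.get(t, 0) + 1
--         for t in set(targets):
--             dependents[t] = dependents.get(t, 0) + 1
--     return sorted(
--         svc for svc, count in incoming.items()
--         if count >= 3 or (dependents.get(svc, 0) >= 2 and len(adj.get(svc, [])) == 0)
--     )
-- ===== Notes on version B (the rewrite author's own statement) =====
-- stated objective: faster
-- what changed: B drops A's per-service rescan of every adjacency list (sum(1 for targets in adj.values() if svc in targets) inside the loop) and instead builds a dependents-count dictionary (one increment per distinct target per list) in the same single pass that builds the incoming-count dictionary, so the final loop is a plain filter with O(1) lookups.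
import Mathlib
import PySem

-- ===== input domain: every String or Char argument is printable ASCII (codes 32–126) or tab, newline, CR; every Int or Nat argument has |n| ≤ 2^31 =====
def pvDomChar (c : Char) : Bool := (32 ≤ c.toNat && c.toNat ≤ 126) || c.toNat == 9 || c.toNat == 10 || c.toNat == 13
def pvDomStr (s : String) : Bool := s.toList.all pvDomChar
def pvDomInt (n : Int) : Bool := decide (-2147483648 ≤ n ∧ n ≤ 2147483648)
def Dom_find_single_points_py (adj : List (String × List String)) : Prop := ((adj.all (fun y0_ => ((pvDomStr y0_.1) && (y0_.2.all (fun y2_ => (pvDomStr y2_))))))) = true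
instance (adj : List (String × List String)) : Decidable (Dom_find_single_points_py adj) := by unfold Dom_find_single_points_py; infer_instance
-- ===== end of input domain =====

-- B replaces A's inner scan of all value lists (per incoming key) by a dependent-count
-- dictionary built in the same single pass as the incoming-count dictionary: O(V+E) work
-- before one final filter, instead of A's O(V*E) rescan.

-- ===== PORT A =====
def find_single_points_py (adj : List (String × List String)) : List String :=
  let d : PySem.Dict String (List String) := PySem.Dict.ofList adj
  let incoming : PySem.Dict String Int :=
    d.values.foldl (fun inc targets =>
      targets.foldl (fun inc t => inc.insert t (inc.getD t 0 + 1)) inc) PySem.Dict.empty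
  let singles : List String :=
    incoming.items.foldl (fun (singles : List String) (p : String × Int) =>
      let dependents : Int :=
        d.values.foldl (fun acc targets => acc + if p.1 ∈ targets then 1 else 0) 0
      let outgoing : Nat := (d.getD p.1 []).length
      if (2 ≤ dependents ∧ outgoing = 0) ∨ 3 ≤ p.2 then singles ++ [p.1] else singles) []
  PySem.List.sorted (PySem.Set.ofList singles) (fun x => x) false

-- ===== PORT B =====
def find_single_points_py_alt (adj : List (String × List String)) : List String :=
  let d : PySem.Dict String (List String) := PySem.Dict.ofList adj
  let st : PySem.Dict String Int × PySem.Dict String Int :=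
    d.values.foldl (fun st targets =>
      (targets.foldl (fun inc t => inc.insert t (inc.getD t 0 + 1)) st.1,
       (PySem.Set.ofList targets).foldl (fun dep t => dep.insert t (dep.getD t 0 + 1)) st.2))
      (PySem.Dict.empty, PySem.Dict.empty)
  PySem.List.sorted
    ((st.1.items.filter (fun p =>
        decide (3 ≤ p.2) ||
          (decide (2 ≤ st.2.getD p.1 0) && decide ((d.getD p.1 []).length = 0)))).map
      (fun p => p.1))
    (fun x => x) false

-- ===== PRECONDITION & SPEC =====
def Spec_find_single_points_py (adj : List (String × List String)) (out : List String) : Prop := out = find_single_points_py_alt adj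
instance (adj : List (String × List String)) (out : List String) : Decidable (Spec_find_single_points_py adj out) := by unfold Spec_find_single_points_py; infer_instance

-- ===== CLAIM (what is proved, stated in full; the proofs are below) =====
def Claim_equal_find_single_points_py : Prop := ∀ (adj : List (String × List String)), Dom_find_single_points_py adj → Spec_find_single_points_py adj (find_single_points_py adj)

-- ===== LEMMAS AND PROOFS =====

-- B's dependents dictionary counts, per service v, the value lists that contain v.
theorem dep_getD (L : List (List String)) (dep : PySem.Dict String Int) (v : String) :
    (L.foldl (fun dE ts =>
        (PySem.Set.ofList ts).foldl (fun dd t => dd.insert t (dd.getD t 0 + 1)) dE) dep).getD v 0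
      = dep.getD v 0 + (L.countP (fun ts => decide (v ∈ ts)) : Int) := by
  induction L generalizing dep with
  | nil => simp
  | cons ts L ih =>
    rw [List.foldl_cons, ih, PySem.Dict.getD_foldl_insert_add_one,
      List.Nodup.count (PySem.Set.nodup_ofList ts)]
    by_cases h : v ∈ ts
    · simp [h]
      ring
    · simp [h, PySem.Set.mem_ofList]

-- A's per-service rescan of all value lists computes the same count.
theorem scan_count (L : List (List String)) (v : String) :
    (L.foldl (fun acc ts => acc + if v ∈ ts then 1 else 0) 0 : Int)
      = (L.countP (fun ts => decide (v ∈ ts)) : Int) := by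
  rw [PySem.List.foldl_add, zero_add]
  have : (fun ts : List String => if v ∈ ts then (1 : Int) else 0)
      = fun ts : List String => if (fun ts : List String => decide (v ∈ ts)) ts = true then 1 else 0 := by
    funext ts; simp
  rw [this, PySem.List.sum_map_ite_one_zero]

-- the incoming dictionary's keys stay duplicate-free through the nested counting loop
theorem nodup_keys_incoming (L : List (List String)) (inc : PySem.Dict String Int)
    (h : inc.keys.Nodup) :
    (L.foldl (fun inc ts => ts.foldl (fun i t => i.insert t (i.getD t 0 + 1)) inc) inc).keys.Nodup := by
  induction L generalizing inc with
  | nil => exact h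
  | cons ts L ih => exact ih _ (PySem.Dict.nodup_keys_foldl_insert ts _ inc h)

-- B's one-pass pair fold is the pair of the two one-dictionary folds
theorem split_pair (L : List (List String)) :
    L.foldl (fun (st : PySem.Dict String Int × PySem.Dict String Int) targets =>
        (targets.foldl (fun inc t => inc.insert t (inc.getD t 0 + 1)) st.1,
         (PySem.Set.ofList targets).foldl (fun dep t => dep.insert t (dep.getD t 0 + 1)) st.2))
      (PySem.Dict.empty, PySem.Dict.empty)
    = (L.foldl (fun inc targets => targets.foldl (fun i t => i.insert t (i.getD t 0 + 1)) inc)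
         PySem.Dict.empty,
       L.foldl (fun dep targets =>
           (PySem.Set.ofList targets).foldl (fun dd t => dd.insert t (dd.getD t 0 + 1)) dep)
         PySem.Dict.empty) :=
  PySem.List.foldl_prod_mk
    (fun (inc : PySem.Dict String Int) targets =>
      targets.foldl (fun i t => i.insert t (i.getD t 0 + 1)) inc)
    (fun (dep : PySem.Dict String Int) targets =>
      (PySem.Set.ofList targets).foldl (fun dd t => dd.insert t (dd.getD t 0 + 1)) dep)
    L PySem.Dict.empty PySem.Dict.empty

-- A's append-accumulating loop over the incoming items is a filter-then-map
theorem A_fold (d : PySem.Dict String (List String)) (items : List (String × Int)) :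
    items.foldl (fun (singles : List String) (p : String × Int) =>
        if 2 ≤ List.foldl (fun acc targets => acc + if p.1 ∈ targets then 1 else 0) (0 : Int) d.values ∧
              ((d.getD p.1 []).length = 0) ∨ 3 ≤ p.2
        then singles ++ [p.1] else singles) []
      = (items.filter (fun p =>
          decide (2 ≤ List.foldl (fun acc targets => acc + if p.1 ∈ targets then 1 else 0) (0 : Int) d.values ∧
              ((d.getD p.1 []).length = 0) ∨ 3 ≤ p.2))).map (fun p => p.1) := by
  have h := PySem.List.foldl_append_if
      (fun p : String × Int =>
        decide (2 ≤ List.foldl (fun acc targets => acc + if p.1 ∈ targets then 1 else 0) (0 : Int) d.values ∧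
            ((d.getD p.1 []).length = 0) ∨ 3 ≤ p.2))
      (fun p : String × Int => p.1) items []
  rw [List.nil_append] at h
  rw [← h]
  apply PySem.List.foldl_congr_mem
  intro s p _
  exact if_congr (by simp) rfl rfl

-- ===== VERDICT (by name: the statement is the Claim_ definition above) =====
theorem find_single_points_py_spec : Claim_equal_find_single_points_py := by
  intro adj _
  unfold Spec_find_single_points_py find_single_points_py find_single_points_py_alt
  dsimp only []
  rw [split_pair]
  dsimp only []
  generalize PySem.Dict.ofList adj = d
  rw [A_fold]
  simp only [dep_getD, PySem.Dict.getD_empty, zero_add, scan_count, Bool.decide_or, Bool.decide_and,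
    Bool.or_comm]
  rw [PySem.Set.ofList_eq_self_of_nodup]
  have hkeys := nodup_keys_incoming d.values PySem.Dict.empty PySem.Dict.nodup_keys_empty
  simp only [PySem.Dict.keys] at hkeys
  exact (List.Sublist.map _ List.filter_sublist).nodup hkeys
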